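-- pv_equiv track=rewrite | github.com/paulklemstine/factor | lean/demo/HigherDimensionalQuadrupleDivisionFactoring/demos/neural_factor_predictor.py | find_quadruples_for_d
-- ===== SOURCE A (Python) =====
-- import math
-- from typing import List, Tuple, Dict, Set
--
-- def find_quadruples_for_d(d: int, limit: int = 50) -> List[List[int]]:
--     """Find Pythagorean quadruples with hypotenuse d."""
--     d2 = d * d
--     quads = []
--     for a in range(0, d + 1):
--         a2 = a * a
--         if a2 >= d2:
--             break
--         for b in range(a, d + 1):
--             b2 = b * b
--             if a2 + b2 >= d2:
--                 break
--             c2 = d2 - a2 - b2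
--             c = int(math.isqrt(c2))
--             if c >= b and c * c == c2:
--                 quads.append([a, b, c])
--                 if len(quads) >= limit:
--                     return quads
--     return quads
-- ===== SOURCE B (Python) =====
-- import math
--
--
-- def _pairs_for_a(target, a):
--     """Lazily yield every (b, c) with a <= b <= c and b*b + c*c = target,
--     in b-ascending order, via a two-pointer scan (b ascending, c descending)."""
--     b = a
--     c = math.isqrt(target)
--     while b <= c:
--         s = b * b + c * c
--         if s > target:
--             c -= 1
--         elif s < target:
--             b += 1
--         else:
--             yield (b, c)
--             b += 1
--             c -= 1
--
--
-- def find_quadruples_for_d(d: int, limit: int = 50):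
--     """Find Pythagorean quadruples with hypotenuse d: per-a two-pointer generator + bounded consumer."""
--     d2 = d * d
--     quads = []
--     for a in range(0, d + 1):
--         if a * a >= d2:
--             break
--         for (b, c) in _pairs_for_a(d2 - a * a, a):
--             quads.append([a, b, c])
--             if len(quads) >= limit:
--                 return quads
--     return quads
-- ===== Notes on version B (the rewrite author's own statement) =====
-- stated objective: alternative
-- what changed: B separates production from consumption: a lazy per-a generator finds all (b,c) with b^2+c^2=d^2-a^2 by a two-pointer scan (b ascending, c descending; no per-b isqrt/perfect-square test), and a separate consumer pulls quadruples from it, appending and stopping at limit, instead of A's single nested loop with the limit check threaded through it.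
import Mathlib
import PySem

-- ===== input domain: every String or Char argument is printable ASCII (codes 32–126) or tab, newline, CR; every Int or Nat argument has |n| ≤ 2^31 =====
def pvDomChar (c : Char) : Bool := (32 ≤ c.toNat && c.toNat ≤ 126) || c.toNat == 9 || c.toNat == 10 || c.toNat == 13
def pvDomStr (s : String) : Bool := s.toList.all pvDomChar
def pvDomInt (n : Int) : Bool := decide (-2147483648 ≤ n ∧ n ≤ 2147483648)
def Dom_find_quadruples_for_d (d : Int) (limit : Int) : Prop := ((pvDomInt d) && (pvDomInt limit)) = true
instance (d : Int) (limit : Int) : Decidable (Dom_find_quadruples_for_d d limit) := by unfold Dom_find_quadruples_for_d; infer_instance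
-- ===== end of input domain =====

-- B separates production from consumption: a lazy per-a two-pointer generator of the (b, c)
-- solutions of b*b + c*c = d*d - a*a (no per-b isqrt/perfect-square test) and a consumer
-- pulling at most limit quadruples from it.

-- math.isqrt n (exact for n ≥ 0; every call site below has a positive argument)
def pyIsqrt (n : Int) : Int := (Nat.sqrt n.toNat : Int)

-- ===== PORT A =====
-- inner `for b in range(a, d+1)` loop; fuel = remaining range length; Bool = early `return`
def innerA (d2 a2 limit a : Int) : Nat → Int → List (List Int) → (List (List Int) × Bool)
  | 0, _, quads => (quads, false)
  | n+1, b, quads =>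
    if d2 ≤ a2 + b * b then (quads, false)
    else
      let c2 := d2 - a2 - b * b
      let c := pyIsqrt c2
      if b ≤ c ∧ c * c = c2 then
        let q := quads ++ [[a, b, c]]
        if limit ≤ (q.length : Int) then (q, true)
        else innerA d2 a2 limit a n (b+1) q
      else innerA d2 a2 limit a n (b+1) quads

-- outer `for a in range(0, d+1)` loop
def outerA (d d2 limit : Int) : Nat → Int → List (List Int) → List (List Int)
  | 0, _, quads => quads
  | n+1, a, quads =>
    if d2 ≤ a * a then quads
    else
      match innerA d2 (a * a) limit a (d + 1 - a).toNat a quads with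
      | (q, true)  => q
      | (q, false) => outerA d d2 limit n (a+1) q

def find_quadruples_for_d (d : Int) (limit : Int) : List (List Int) :=
  outerA d (d * d) limit (d + 1).toNat 0 []

-- ===== PORT B =====
-- one resumption of the generator _pairs_for_a: from pointer state (b, c), advance the
-- two-pointer scan to the next yield (và the state after it), or to exhaustion (none);
-- fuel bounds the shrinking window c+1-b
def scanNext (target : Int) : Nat → Int → Int → Option ((Int × Int) × (Int × Int))
  | 0, _, _ => none
  | n+1, b, c =>
    if c < b then none
    else if target < b * b + c * c then scanNext target n b (c-1)
    else if b * b + c * c < target then scanNext target n (b+1) c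
    else some ((b, c), (b+1, c-1))

-- the consumer's inner `for (b, c) in _pairs_for_a(...)` loop: pull, append, stop at limit;
-- fuel = number of pulls; Bool = early `return`
def innerB (target limit a : Int) : Nat → (Int × Int) → List (List Int) → (List (List Int) × Bool)
  | 0, _, quads => (quads, false)
  | n+1, st, quads =>
    match scanNext target ((st.2 + 1 - st.1).toNat + 1) st.1 st.2 with
    | none => (quads, false)
    | some (bc, st') =>
      let q := quads ++ [[a, bc.1, bc.2]]
      if limit ≤ (q.length : Int) then (q, true)
      else innerB target limit a n st' q

-- B's `for a in range(0, d+1)` loop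
def outerB (d d2 limit : Int) : Nat → Int → List (List Int) → List (List Int)
  | 0, _, quads => quads
  | n+1, a, quads =>
    if d2 ≤ a * a then quads
    else
      let c0 := pyIsqrt (d2 - a * a)
      match innerB (d2 - a * a) limit a ((c0 + 1 - a).toNat + 1) (a, c0) quads with
      | (q, true)  => q
      | (q, false) => outerB d d2 limit n (a+1) q

def find_quadruples_for_d_alt (d : Int) (limit : Int) : List (List Int) :=
  outerB d (d * d) limit (d + 1).toNat 0 []

-- ===== PRECONDITION & SPEC =====
def Spec_find_quadruples_for_d (d : Int) (limit : Int) (out : List (List Int)) : Prop := out = find_quadruples_for_d_alt d limit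
instance (d : Int) (limit : Int) (out : List (List Int)) : Decidable (Spec_find_quadruples_for_d d limit out) := by unfold Spec_find_quadruples_for_d; infer_instance

-- ===== CLAIM (what is proved, stated in full; the proofs are below) =====
def Claim_equal_find_quadruples_for_d : Prop := ∀ (d : Int) (limit : Int), Dom_find_quadruples_for_d d limit → Spec_find_quadruples_for_d d limit (find_quadruples_for_d d limit)

-- ===== LEMMAS AND PROOFS =====

-- pyIsqrt facts
lemma pyIsqrt_nonneg (n : Int) : 0 ≤ pyIsqrt n := Int.natCast_nonneg _

lemma pyIsqrt_sq_le (n : Int) (h : 0 ≤ n) : pyIsqrt n * pyIsqrt n ≤ n := by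
  have h1 := Nat.sqrt_le' n.toNat
  rw [pow_two] at h1
  have h2 : ((Nat.sqrt n.toNat * Nat.sqrt n.toNat : Nat) : Int) ≤ (n.toNat : Int) :=
    Int.ofNat_le.mpr h1
  rw [Int.toNat_of_nonneg h] at h2
  push_cast at h2
  simpa [pyIsqrt] using h2

lemma pyIsqrt_lt_succ (n : Int) (h : 0 ≤ n) : n < (pyIsqrt n + 1) * (pyIsqrt n + 1) := by
  have h1 := Nat.lt_succ_sqrt' n.toNat
  rw [pow_two] at h1
  have h2 : ((n.toNat : Nat) : Int) < (((Nat.sqrt n.toNat + 1) * (Nat.sqrt n.toNat + 1) : Nat) : Int) :=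
    Int.ofNat_lt.mpr h1
  rw [Int.toNat_of_nonneg h] at h2
  push_cast at h2
  simpa [pyIsqrt] using h2

lemma le_pyIsqrt (b n : Int) (hb : 0 ≤ b) (h : b * b ≤ n) : b ≤ pyIsqrt n := by
  have hn : 0 ≤ n := le_trans (mul_self_nonneg b) h
  have h1 : b.toNat * b.toNat ≤ n.toNat := by
    have : ((b.toNat * b.toNat : Nat) : Int) ≤ (n.toNat : Int) := by
      push_cast
      rw [Int.toNat_of_nonneg hb, Int.toNat_of_nonneg hn]
      exact h
    exact_mod_cast this
  rw [← pow_two] at h1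
  have h2 : b.toNat ≤ Nat.sqrt n.toNat := Nat.le_sqrt'.mpr h1
  have h3 : ((b.toNat : Nat) : Int) ≤ ((Nat.sqrt n.toNat : Nat) : Int) := Int.ofNat_le.mpr h2
  rw [Int.toNat_of_nonneg hb] at h3
  simpa [pyIsqrt] using h3

lemma pyIsqrt_sq (c : Int) (h : 0 ≤ c) : pyIsqrt (c * c) = c := by
  rcases Int.eq_ofNat_of_zero_le h with ⟨m, rfl⟩
  unfold pyIsqrt
  have h1 : ((m : Int) * (m : Int)).toNat = m * m := by
    rw [← Nat.cast_mul, Int.toNat_natCast]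
  rw [h1, ← pow_two, Nat.sqrt_eq']

-- A's inner loop as an append-with-limit consumer of its generated pair list
def emit (limit a : Int) : List (List Int) → List (Int × Int) → (List (List Int) × Bool)
  | quads, [] => (quads, false)
  | quads, (b, c) :: rest =>
      let q := quads ++ [[a, b, c]]
      if limit ≤ (q.length : Int) then (q, true) else emit limit a q rest

-- the pair list A's inner loop generates (limit ignored)
def genA (d2 a2 : Int) : Nat → Int → List (Int × Int)
  | 0, _ => []
  | n+1, b =>
    if d2 ≤ a2 + b * b then []
    else
      let c2 := d2 - a2 - b * b
      let c := pyIsqrt c2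
      if b ≤ c ∧ c * c = c2 then (b, c) :: genA d2 a2 n (b+1) else genA d2 a2 n (b+1)

-- the pair list the full two-pointer scan produces (limit ignored)
def scanPairs (target : Int) : Nat → Int → Int → List (Int × Int)
  | 0, _, _ => []
  | n+1, b, c =>
    if c < b then []
    else if target < b * b + c * c then scanPairs target n b (c-1)
    else if b * b + c * c < target then scanPairs target n (b+1) c
    else (b, c) :: scanPairs target n (b+1) (c-1)

lemma innerA_emit (d2 a2 limit a : Int) : ∀ (n : Nat) (b : Int) (quads : List (List Int)),
    innerA d2 a2 limit a n b quads = emit limit a quads (genA d2 a2 n b) := by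
  intro n
  induction n with
  | zero => intro b quads; rfl
  | succ n ih =>
    intro b quads
    by_cases h1 : d2 ≤ a2 + b * b
    · simp only [innerA, genA, if_pos h1]; rfl
    · by_cases h2 : b ≤ pyIsqrt (d2 - a2 - b * b) ∧
          pyIsqrt (d2 - a2 - b * b) * pyIsqrt (d2 - a2 - b * b) = d2 - a2 - b * b
      · simp only [innerA, genA, if_neg h1, if_pos h2, emit]
        by_cases h3 : limit ≤ ((quads ++ [[a, b, pyIsqrt (d2 - a2 - b * b)]]).length : Int)
        · simp only [if_pos h3]
        · simp only [if_neg h3]; exact ih (b+1) _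
      · simp only [innerA, genA, if_neg h1, if_neg h2]; exact ih (b+1) quads

lemma genA_nil (d2 a2 : Int) : ∀ (n : Nat) (b : Int),
    (∀ b' c' : Int, b ≤ b' → b' ≤ c' → b' * b' + c' * c' = d2 - a2 → False) →
    genA d2 a2 n b = [] := by
  intro n
  induction n with
  | zero => intro b _; rfl
  | succ n ih =>
    intro b H
    simp only [genA]
    split_ifs with h1 h2
    · rfl
    · exact (H b (pyIsqrt (d2 - a2 - b * b)) le_rfl h2.1 (by linarith [h2.2])).elim
    · exact ih (b+1) (fun b' c' hb' => H b' c' (by omega))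

-- the two-pointer scan produces exactly A's pair list
lemma scanPairs_eq_genA (d2 a2 : Int) (ht : 0 < d2 - a2) :
    ∀ (nB : Nat) (b c : Int) (nA : Nat), 0 ≤ b → -1 ≤ c →
    d2 - a2 < b * b + (c + 1) * (c + 1) →
    (c + 1 - b).toNat < nB →
    pyIsqrt (d2 - a2) + 1 ≤ (nA : Int) + b →
    scanPairs (d2 - a2) nB b c = genA d2 a2 nA b := by
  intro nB
  induction nB with
  | zero => intro b c nA _ _ _ hf _; omega
  | succ nB ih =>
    intro b c nA hb hc hinv hf hA
    simp only [scanPairs]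
    split_ifs with h1 h2 h3
    · -- c < b : no solutions at or beyond b
      symm
      apply genA_nil
      intro b' c' hb' hc' hsum
      nlinarith
    · -- overshoot: move c down
      exact ih b (c-1) nA hb (by omega) (by nlinarith) (by omega) hA
    · -- undershoot: move b up, A also skips this b
      have hcb : b ≤ c := by omega
      have hc0 : 0 ≤ c := by omega
      have hbb : b * b < d2 - a2 := by nlinarith
      have hbS : b ≤ pyIsqrt (d2 - a2) := le_pyIsqrt b _ hb (le_of_lt hbb)
      have hnA : 1 ≤ nA := by
        by_contra hk
        have hz : nA = 0 := by omega
        rw [hz] at hA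
        simp at hA
        linarith
      obtain ⟨k, rfl⟩ : ∃ k, nA = k + 1 := ⟨nA - 1, by omega⟩
      simp only [genA]
      rw [if_neg (by linarith : ¬ d2 ≤ a2 + b * b)]
      rw [if_neg ?hno]
      case hno =>
        rintro ⟨hbc', hsq⟩
        have h0 : 0 ≤ pyIsqrt (d2 - a2 - b * b) := pyIsqrt_nonneg _
        have hlt : pyIsqrt (d2 - a2 - b * b) * pyIsqrt (d2 - a2 - b * b) < (c + 1) * (c + 1) := by
          linarith
        have h5 : pyIsqrt (d2 - a2 - b * b) ≤ c := by
          by_contra hgt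
          have h6 : c + 1 ≤ pyIsqrt (d2 - a2 - b * b) := by omega
          nlinarith [mul_self_le_mul_self (show (0:Int) ≤ c + 1 by omega) h6]
        nlinarith [mul_self_le_mul_self hc0 (le_refl c)]
      exact ih (b+1) c k (by omega) hc (by nlinarith) (by omega) (by push_cast at hA; linarith)
    · -- hit: both emit (b, c)
      have hcb : b ≤ c := by omega
      have hc0 : 0 ≤ c := by omega
      have hs : b * b + c * c = d2 - a2 := by omega
      have hcpos : 1 ≤ c := by
        rcases lt_or_ge c 1 with h' | h'
        · have hcz : c = 0 := by omega
          have hbz : b = 0 := by omega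
          rw [hcz, hbz] at hs
          norm_num at hs
          omega
        · exact h'
      have hbb : b * b < d2 - a2 := by nlinarith
      have hbS : b ≤ pyIsqrt (d2 - a2) := le_pyIsqrt b _ hb (le_of_lt hbb)
      have hnA : 1 ≤ nA := by
        by_contra hk
        have hz : nA = 0 := by omega
        rw [hz] at hA
        simp at hA
        linarith
      obtain ⟨k, rfl⟩ : ∃ k, nA = k + 1 := ⟨nA - 1, by omega⟩
      simp only [genA]
      rw [if_neg (by linarith : ¬ d2 ≤ a2 + b * b)]
      have hcc : d2 - a2 - b * b = c * c := by linarith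
      rw [hcc, pyIsqrt_sq c hc0, if_pos ⟨hcb, rfl⟩]
      congr 1
      exact ih (b+1) (c-1) k (by omega) (by omega) (by nlinarith) (by omega)
        (by push_cast at hA; linarith)

-- scanPairs does not depend on the fuel as long as it exceeds the window
lemma scanPairs_fuel (t : Int) : ∀ (n : Nat) (b c : Int) (m : Nat),
    (c + 1 - b).toNat < n → (c + 1 - b).toNat < m →
    scanPairs t n b c = scanPairs t m b c := by
  intro n
  induction n with
  | zero => intro b c m hn _; omega
  | succ n ih =>
    intro b c m hn hm
    obtain ⟨m', rfl⟩ : ∃ m', m = m' + 1 := ⟨m - 1, by omega⟩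
    simp only [scanPairs]
    split_ifs with h1 h2 h3
    · rfl
    · exact ih b (c-1) m' (by omega) (by omega)
    · exact ih (b+1) c m' (by omega) (by omega)
    · rw [ih (b+1) (c-1) m' (by omega) (by omega)]

-- one generator resumption against the full scan: either both are exhausted, or scanNext
-- yields the scan's head and the state for its tail
lemma scanNext_spec (t : Int) : ∀ (n : Nat) (b c : Int), (c + 1 - b).toNat < n →
    (scanNext t n b c = none ∧ scanPairs t n b c = []) ∨
    (∃ b' c', scanNext t n b c = some ((b', c'), (b'+1, c'-1)) ∧ b ≤ b' ∧ c' ≤ c ∧ b' ≤ c' ∧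
      scanPairs t n b c = (b', c') :: scanPairs t ((c' - b' - 1).toNat + 1) (b'+1) (c'-1)) := by
  intro n
  induction n with
  | zero => intro b c hn; omega
  | succ n ih =>
    intro b c hn
    simp only [scanNext, scanPairs]
    split_ifs with h1 h2 h3
    · exact Or.inl ⟨rfl, rfl⟩
    · rcases ih b (c-1) (by omega) with ⟨hN, hP⟩ | ⟨b', c', hN, hb', hc', hbc', hP⟩
      · exact Or.inl ⟨hN, hP⟩
      · exact Or.inr ⟨b', c', hN, hb', by omega, hbc', hP⟩
    · rcases ih (b+1) c (by omega) with ⟨hN, hP⟩ | ⟨b', c', hN, hb', hc', hbc', hP⟩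
      · exact Or.inl ⟨hN, hP⟩
      · exact Or.inr ⟨b', c', hN, by omega, hc', hbc', hP⟩
    · refine Or.inr ⟨b, c, rfl, le_rfl, le_rfl, by omega, ?_⟩
      rw [scanPairs_fuel t n (b+1) (c-1) ((c - b - 1).toNat + 1) (by omega) (by omega)]
      simp only [scanPairs]

-- B's pulling consumer is emit over the full scan's pair list
lemma innerB_emit (target limit a : Int) : ∀ (n : Nat) (b c : Int) (quads : List (List Int)),
    (c + 1 - b).toNat < n →
    innerB target limit a n (b, c) quads =
      emit limit a quads (scanPairs target ((c + 1 - b).toNat + 1) b c) := by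
  intro n
  induction n with
  | zero => intro b c quads hn; omega
  | succ n ih =>
    intro b c quads hn
    simp only [innerB]
    rcases scanNext_spec target ((c + 1 - b).toNat + 1) b c (by omega)
      with ⟨hN, hP⟩ | ⟨b', c', hN, hb', hc', hbc', hP⟩
    · rw [hN, hP]; rfl
    · rw [hN, hP]
      simp only [emit]
      by_cases hl : limit ≤ ((quads ++ [[a, b', c']]).length : Int)
      · simp only [if_pos hl]
      · simp only [if_neg hl]
        have hww : c' + 1 - b' ≤ c + 1 - b := by omega
        have hw1 : 1 ≤ c' + 1 - b' := by omega
        have e1 : c' - 1 + 1 - (b' + 1) = c' - b' - 1 := by ring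
        have hw : (c' - 1 + 1 - (b' + 1)).toNat < n := by rw [e1]; omega
        rw [ih (b'+1) (c'-1) _ hw]
        congr 2
        omega

lemma outer_eq (d d2 limit : Int) (hd2 : d2 = d * d) :
    ∀ (n : Nat) (a : Int) (quads : List (List Int)), 0 ≤ a → n = (d + 1 - a).toNat →
    outerA d d2 limit n a quads = outerB d d2 limit n a quads := by
  intro n
  induction n with
  | zero => intro a quads _ _; rfl
  | succ n ih =>
    intro a quads ha hn
    have had : a ≤ d := by omega
    have hd0 : 0 ≤ d := le_trans ha had
    simp only [outerA, outerB]
    split_ifs with h1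
    · rfl
    · have ht : 0 < d2 - a * a := by omega
      have hSd : pyIsqrt (d2 - a * a) ≤ d := by
        by_contra hs
        have h3 := pyIsqrt_sq_le (d2 - a * a) (le_of_lt ht)
        have h4 : d + 1 ≤ pyIsqrt (d2 - a * a) := by omega
        nlinarith [mul_self_nonneg a]
      have hgen : scanPairs (d2 - a * a) ((pyIsqrt (d2 - a * a) + 1 - a).toNat + 1) a (pyIsqrt (d2 - a * a))
          = genA d2 (a * a) (d + 1 - a).toNat a := by
        apply scanPairs_eq_genA d2 (a * a) ht _ a (pyIsqrt (d2 - a * a)) _ ha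
          (le_trans (by norm_num) (pyIsqrt_nonneg _))
          (by nlinarith [pyIsqrt_lt_succ (d2 - a * a) (le_of_lt ht), mul_self_nonneg a])
          (by omega)
        · have : ((d + 1 - a).toNat : Int) = d + 1 - a := by omega
          rw [this]
          linarith
      rw [innerA_emit, innerB_emit _ _ _ _ _ _ _ (by omega), hgen]
      rcases hE : emit limit a quads (genA d2 (a * a) (d + 1 - a).toNat a) with ⟨q, fl⟩
      cases fl
      · exact ih (a + 1) q (by omega) (by omega)
      · rfl

-- ===== VERDICT (by name: the statement is the Claim_ definition above) =====
theorem find_quadruples_for_d_spec : Claim_equal_find_quadruples_for_d := by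
  intro d limit _
  unfold Spec_find_quadruples_for_d find_quadruples_for_d find_quadruples_for_d_alt
  exact outer_eq d (d * d) limit rfl (d + 1).toNat 0 [] le_rfl (by omega)
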